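-- pv_equiv track=rewrite | github.com/mizansyed101/ebook-agent-pdf | app.py | parse_outline_sections
-- ===== SOURCE A (Python) =====
-- def parse_outline_sections(outline_text):
--     """Parse the outline into individual chapter sections."""
--     sections = []
--     current_section = []
--
--     for line in outline_text.strip().split('\n'):
--         if line.startswith('## '):
--             if current_section:
--                 sections.append('\n'.join(current_section))
--             current_section = [line]
--         elif line.startswith('# '):
--             continue
--         else:
--             current_section.append(line)
--
--     if current_section:
--         sections.append('\n'.join(current_section))
--
--     return sections
-- ===== SOURCE B (Python) =====
-- def parse_outline_sections(outline_text):
--     """Parse the outline into individual chapter sections."""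
--     lines = [l for l in outline_text.strip().split('\n') if not l.startswith('# ')]
--     if not lines:
--         return []
--     return _sections(lines)
--
--
-- def _sections(lines):
--     # lines is non-empty; the first section is lines[0] together with the
--     # following run of non-'## ' lines; recurse on what remains.
--     head, rest = lines[0], lines[1:]
--     body = []
--     while rest and not rest[0].startswith('## '):
--         body.append(rest[0])
--         rest = rest[1:]
--     sec = '\n'.join([head] + body)
--     return [sec] + (_sections(rest) if rest else [])
-- ===== Notes on version B (the rewrite author's own statement) =====
-- stated objective: alternative
-- what changed: Replaces the single accumulate-and-flush loop with state (sections, current_section) by a two-phase decomposition: first filter out the '# ' lines, then recursively peel off one section at a time (first line plus the following run of non-'## ' lines).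
import Mathlib
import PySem

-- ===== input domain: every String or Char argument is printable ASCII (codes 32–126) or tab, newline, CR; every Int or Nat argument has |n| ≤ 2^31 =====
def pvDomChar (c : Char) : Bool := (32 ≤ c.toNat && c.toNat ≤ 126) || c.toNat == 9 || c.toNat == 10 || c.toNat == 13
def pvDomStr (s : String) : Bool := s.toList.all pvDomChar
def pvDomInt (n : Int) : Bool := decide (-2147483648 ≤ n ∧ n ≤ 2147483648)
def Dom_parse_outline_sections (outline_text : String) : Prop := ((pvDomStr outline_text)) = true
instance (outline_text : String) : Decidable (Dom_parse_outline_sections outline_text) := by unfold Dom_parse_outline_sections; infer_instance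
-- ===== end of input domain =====

-- B is an alternative decomposition (filter the '# ' lines first, then recursively peel off
-- one section at a time) of A's accumulate-and-flush loop; same cost, return values proved equal.

-- ===== PORT A =====
-- one loop over the lines with state (sections, current_section); flush at the end
def parse_outline_sections (outline_text : String) : List String :=
  let st := ((PySem.Str.split? (PySem.Str.strip outline_text) "\n").getD []).foldl
    (fun (st : List String × List String) line =>
      if PySem.Str.startswith line "## " then
        ((if st.2.isEmpty then st.1 else st.1 ++ [PySem.Str.join "\n" st.2]), [line])
      else if PySem.Str.startswith line "# " then
        st
      else
        (st.1, st.2 ++ [line]))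
    ([], [])
  if st.2.isEmpty then st.1 else st.1 ++ [PySem.Str.join "\n" st.2]

-- ===== PORT B =====
-- Source B's _sections: lines non-empty; the first section is lines[0] together with the
-- following run of non-'## ' lines; recurse on what remains
def pvAltSections (lines : List String) : List String :=
  match lines with
  | [] => []
  | head :: rest =>
    let body := rest.takeWhile (fun l => !PySem.Str.startswith l "## ")
    let rest' := rest.dropWhile (fun l => !PySem.Str.startswith l "## ")
    PySem.Str.join "\n" (head :: body) :: (if rest'.isEmpty then [] else pvAltSections rest')
termination_by lines.length
decreasing_by
  calc rest'.length ≤ rest.length := List.length_dropWhile_le _ _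
    _ < (head :: rest).length := by simp

def parse_outline_sections_alt (outline_text : String) : List String :=
  let lines := ((PySem.Str.split? (PySem.Str.strip outline_text) "\n").getD []).filter
    (fun l => !PySem.Str.startswith l "# ")
  if lines.isEmpty then [] else pvAltSections lines

-- ===== PRECONDITION & SPEC =====
def Spec_parse_outline_sections (outline_text : String) (out : List String) : Prop := out = parse_outline_sections_alt outline_text
instance (outline_text : String) (out : List String) : Decidable (Spec_parse_outline_sections outline_text out) := by unfold Spec_parse_outline_sections; infer_instance

-- ===== CLAIM (what is proved, stated in full; the proofs are below) =====
def Claim_equal_parse_outline_sections : Prop := ∀ (outline_text : String), Dom_parse_outline_sections outline_text → Spec_parse_outline_sections outline_text (parse_outline_sections outline_text)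

-- ===== LEMMAS AND PROOFS =====

-- names for A's loop body and final flush (definitionally the ones in the port)
def pvStep (st : List String × List String) (line : String) : List String × List String :=
  if PySem.Str.startswith line "## " then
    ((if st.2.isEmpty then st.1 else st.1 ++ [PySem.Str.join "\n" st.2]), [line])
  else if PySem.Str.startswith line "# " then
    st
  else
    (st.1, st.2 ++ [line])

def pvFlush (st : List String × List String) : List String :=
  if st.2.isEmpty then st.1 else st.1 ++ [PySem.Str.join "\n" st.2]

theorem pvA_eq (t : String) : parse_outline_sections t =
    pvFlush (((PySem.Str.split? (PySem.Str.strip t) "\n").getD []).foldl pvStep ([], [])) := rfl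

-- a line starting with "# " does not start with "## "
theorem pv_hash_not_hh (l : String) (h : PySem.Str.startswith l "# " = true) :
    PySem.Str.startswith l "## " = false := by
  simp only [PySem.Str.startswith_eq] at *
  rw [PySem.Chars.startswith_iff] at h
  by_contra hc
  simp only [Bool.not_eq_false] at hc
  rw [PySem.Chars.startswith_iff] at hc
  obtain ⟨t1, h1⟩ := h
  obtain ⟨t2, h2⟩ := hc
  have : ('#' :: ' ' :: t1 : List Char) = '#' :: '#' :: t2 := by
    simpa using h1.trans h2.symm
  simp at this

-- folding pvStep ignores the '# ' lines: fold over the filtered list instead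
theorem pv_fold_filter (ls : List String) (st : List String × List String) :
    ls.foldl pvStep st = (ls.filter (fun l => !PySem.Str.startswith l "# ")).foldl pvStep st := by
  induction ls generalizing st with
  | nil => rfl
  | cons l ls ih =>
    by_cases h : PySem.Str.startswith l "# " = true
    · have h2 := pv_hash_not_hh l h
      have hstep : pvStep st l = st := by
        simp only [pvStep, h, h2, Bool.false_eq_true, if_false, if_true]
      simp only [List.foldl_cons, List.filter_cons, h, Bool.not_true, Bool.false_eq_true,
        if_false]
      rw [hstep, ih]
    · simp only [Bool.not_eq_true] at h
      simp only [List.foldl_cons, List.filter_cons, h, Bool.not_false, if_true]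
      rw [ih]

-- the tail part of pvAltSections, as a function
def pvTail (T : List String) : List String := if T.isEmpty then [] else pvAltSections T

theorem pvTail_cons (l : String) (F : List String) : pvTail (l :: F) = pvAltSections (l :: F) := by
  rw [pvTail]; simp

theorem pvAlt_cons (l : String) (F : List String) :
    pvAltSections (l :: F) =
      PySem.Str.join "\n" (l :: F.takeWhile (fun l => !PySem.Str.startswith l "## ")) ::
        pvTail (F.dropWhile (fun l => !PySem.Str.startswith l "## ")) := by
  rw [pvAltSections, pvTail]

-- key invariant: on a list free of '# ' lines, with a non-empty current section, the flushed
-- fold is the current section glued to the leading non-'## ' run, then the sections of the rest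
theorem pv_fold_glue (F : List String)
    (hF : ∀ l ∈ F, PySem.Str.startswith l "# " = false)
    (secs cur : List String) (hcur : cur ≠ []) :
    pvFlush (F.foldl pvStep (secs, cur)) =
      secs ++ PySem.Str.join "\n" (cur ++ F.takeWhile (fun l => !PySem.Str.startswith l "## ")) ::
        pvTail (F.dropWhile (fun l => !PySem.Str.startswith l "## ")) := by
  induction F generalizing secs cur with
  | nil =>
    simp [pvFlush, pvTail, hcur]
  | cons l F ih =>
    have hF' : ∀ x ∈ F, PySem.Str.startswith x "# " = false :=
      fun x hx => hF x (List.mem_cons_of_mem _ hx)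
    by_cases h : PySem.Str.startswith l "## " = true
    · -- header line: flush cur, restart with [l]
      have hstep : pvStep (secs, cur) l = (secs ++ [PySem.Str.join "\n" cur], [l]) := by
        simp only [pvStep, h, if_true, List.isEmpty_iff, if_neg hcur]
      rw [List.foldl_cons, hstep, ih hF' _ _ (by simp)]
      rw [List.takeWhile_cons, List.dropWhile_cons]
      simp only [h, Bool.not_true, Bool.false_eq_true, if_false]
      rw [pvTail_cons, pvAlt_cons]
      simp
    · have h1 : PySem.Str.startswith l "## " = false := by simpa using h
      have h2 : PySem.Str.startswith l "# " = false := hF l List.mem_cons_self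
      have hstep : pvStep (secs, cur) l = (secs, cur ++ [l]) := by
        simp only [pvStep, h1, h2, Bool.false_eq_true, if_false]
      rw [List.foldl_cons, hstep, ih hF' _ _ (by simp)]
      rw [List.takeWhile_cons, List.dropWhile_cons]
      simp only [h1, Bool.not_false, if_true]
      simp

-- ===== VERDICT (by name: the statement is the Claim_ definition above) =====
theorem parse_outline_sections_spec : Claim_equal_parse_outline_sections := by
  intro t _
  unfold Spec_parse_outline_sections parse_outline_sections_alt
  rw [pvA_eq, pv_fold_filter]
  set F := (((PySem.Str.split? (PySem.Str.strip t) "\n").getD []).filter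
    (fun l => !PySem.Str.startswith l "# ")) with hFdef
  have hF : ∀ l ∈ F, PySem.Str.startswith l "# " = false := by
    intro l hl
    have := List.of_mem_filter hl
    simpa using this
  clear hFdef
  match F, hF with
  | [], _ => simp [pvFlush]
  | l :: F', hF =>
    have h2 : PySem.Str.startswith l "# " = false := hF l List.mem_cons_self
    have hstep0 : pvStep ([], []) l = ([], [l]) := by
      by_cases h : PySem.Str.startswith l "## " = true
      · simp only [pvStep, h, if_true, List.isEmpty_nil]
      · have h1 : PySem.Str.startswith l "## " = false := by simpa using h
        simp only [pvStep, h1, h2, Bool.false_eq_true, if_false, List.nil_append]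
    rw [List.foldl_cons, hstep0,
      pv_fold_glue F' (fun x hx => hF x (List.mem_cons_of_mem _ hx)) [] [l] (by simp)]
    rw [if_neg (by simp), pvAlt_cons]
    simp
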